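-- pv_equiv track=rewrite | github.com/welsol21/FYP_LLM | ela_pipeline/inference/enrichment_quality_control.py | _is_valid_synonyms
-- ===== SOURCE A (Python) =====
-- from typing import Any, Dict, Iterable
--
-- def _is_valid_synonyms(value: Any) -> bool:
--     if not isinstance(value, list) or not value:
--         return False
--     normalized = []
--     for item in value:
--         if not isinstance(item, str) or item.strip() == "":
--             return False
--         normalized.append(item.strip().lower())
--     return len(set(normalized)) == len(normalized)
-- ===== SOURCE B (Python) =====
-- def _is_valid_synonyms(value) -> bool:
--     if not isinstance(value, list) or not value:
--         return False
--     seen = set()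
--     for item in value:
--         if not isinstance(item, str):
--             return False
--         norm = item.strip().lower()
--         if not norm or norm in seen:
--             return False
--         seen.add(norm)
--     return True
-- ===== Notes on version B (the rewrite author's own statement) =====
-- stated objective: faster
-- what changed: Replaces A's two-phase collect-then-compare (build a full normalized list, then compare set size with list length) by one single pass with a running seen-set that rejects a blank or already-seen normalized item immediately, so invalid inputs short-circuit and no second list or final comparison is built.
import Mathlib
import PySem

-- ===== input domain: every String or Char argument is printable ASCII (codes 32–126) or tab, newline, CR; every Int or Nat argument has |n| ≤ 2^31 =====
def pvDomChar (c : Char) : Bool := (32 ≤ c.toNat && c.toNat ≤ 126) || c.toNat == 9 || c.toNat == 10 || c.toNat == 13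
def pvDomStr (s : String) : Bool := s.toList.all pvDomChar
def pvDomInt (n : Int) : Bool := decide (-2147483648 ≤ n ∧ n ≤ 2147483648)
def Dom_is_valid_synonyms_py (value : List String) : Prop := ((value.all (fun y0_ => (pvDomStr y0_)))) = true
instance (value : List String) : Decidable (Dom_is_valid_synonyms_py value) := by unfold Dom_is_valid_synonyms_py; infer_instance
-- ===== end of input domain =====

-- B replaces A's two-phase "collect normalized values, then compare set size with list length"
-- by a single pass with a running seen-set that rejects blanks and duplicates immediately (objective: simpler).

-- ===== PORT A =====
-- A's loop: early-return False on a blank item, otherwise append strip().lower() to `normalized`;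
-- after the loop, len(set(normalized)) == len(normalized).
def pvALoop : List String → List String → Bool
  | [], normalized => PySem.Set.len (PySem.Set.ofList normalized) == PySem.List.len normalized
  | item :: rest, normalized =>
    if PySem.Str.strip item = "" then false
    else pvALoop rest (normalized ++ [PySem.Str.lower (PySem.Str.strip item)])

def is_valid_synonyms_py (value : List String) : Bool :=
  -- `not isinstance(value, list)` is always false under the type convention; `not value` = empty list
  if value = [] then false else pvALoop value []

-- ===== PORT B =====
-- B's loop: one pass with a seen-set; reject a blank or already-seen normalized item at once.
def pvBLoop : List String → PySem.Set String → Bool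
  | [], _ => true
  | item :: rest, seen =>
    let norm := PySem.Str.lower (PySem.Str.strip item)
    if norm = "" || PySem.Set.contains seen norm then false
    else pvBLoop rest (PySem.Set.add seen norm)

def is_valid_synonyms_py_alt (value : List String) : Bool :=
  if value = [] then false else pvBLoop value PySem.Set.empty

-- ===== PRECONDITION & SPEC =====
def Spec_is_valid_synonyms_py (value : List String) (out : Bool) : Prop := out = is_valid_synonyms_py_alt value
instance (value : List String) (out : Bool) : Decidable (Spec_is_valid_synonyms_py value out) := by unfold Spec_is_valid_synonyms_py; infer_instance

-- ===== CLAIM (what is proved, stated in full; the proofs are below) =====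
def Claim_equal_is_valid_synonyms_py : Prop := ∀ (value : List String), Dom_is_valid_synonyms_py value → Spec_is_valid_synonyms_py value (is_valid_synonyms_py value)

-- ===== LEMMAS AND PROOFS =====

-- set(xs) (first occurrences) is a sublist of xs
theorem pv_ofList_sublist {α : Type} [BEq α] [LawfulBEq α] (xs : List α) :
    (PySem.Set.ofList xs).Sublist xs := by
  induction xs using List.reverseRecOn with
  | nil => simp [PySem.Set.ofList_nil]
  | append_singleton ys y ih =>
    rw [PySem.Set.ofList_append_singleton]
    by_cases h : y ∈ PySem.Set.ofList ys
    · rw [PySem.Set.add_of_mem h]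
      exact ih.trans (List.sublist_append_left ys [y])
    · rw [PySem.Set.add_of_not_mem h]
      exact List.Sublist.append ih (List.Sublist.refl [y])

-- if the accumulator already contains a duplicate, A's final size comparison fails
-- (and a later blank item also yields False), so A's loop returns False
theorem pvALoop_of_not_nodup (l : List String) :
    ∀ acc : List String, ¬ acc.Nodup → pvALoop l acc = false := by
  induction l with
  | nil =>
    intro acc h
    simp only [pvALoop, PySem.Set.len, PySem.List.len_eq]
    rw [beq_eq_false_iff_ne]
    intro hlen'
    have hlen : (PySem.Set.ofList acc).length = acc.length := by exact_mod_cast hlen'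
    have heq := (pv_ofList_sublist acc).eq_of_length hlen
    exact h (heq ▸ PySem.Set.nodup_ofList acc)
  | cons item rest ih =>
    intro acc h
    simp only [pvALoop]
    split
    · rfl
    · exact ih _ (fun hn => h (hn.sublist (List.sublist_append_left acc _)))

-- a lowered string is empty iff the original is
theorem pv_lower_eq_empty_iff (s : String) : (PySem.Str.lower s = "") ↔ s = "" := by
  constructor
  · intro h
    have := congrArg String.toList h
    rw [PySem.Str.toList_lower] at this
    simp only [String.toList_empty] at this
    simp only [PySem.Chars.lower, List.map_eq_nil_iff] at this
    exact String.ext (by simp [this])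
  · intro h; subst h; rfl

-- main invariant: with a duplicate-free accumulator the two loops agree
theorem pv_loop_eq (l : List String) :
    ∀ acc : List String, acc.Nodup → pvALoop l acc = pvBLoop l acc := by
  induction l with
  | nil =>
    intro acc h
    simp [pvALoop, pvBLoop, PySem.Set.ofList_eq_self_of_nodup acc h]
  | cons item rest ih =>
    intro acc h
    simp only [pvALoop, pvBLoop]
    by_cases hb : PySem.Str.strip item = ""
    · rw [if_pos hb, if_pos]
      simp [pv_lower_eq_empty_iff, hb]
    · rw [if_neg hb]
      by_cases hm : PySem.Str.lower (PySem.Str.strip item) ∈ acc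
      · rw [if_pos, pvALoop_of_not_nodup]
        · simp [List.nodup_append, hm]
        · simp [hm]
      · rw [if_neg, PySem.Set.add_of_not_mem hm]
        · refine ih _ ?_
          simp only [List.nodup_append, List.nodup_cons, List.not_mem_nil, not_false_iff,
            List.nodup_nil, and_true]
          refine ⟨h, trivial, ?_⟩
          intro a ha b hbm hc
          simp only [List.mem_singleton] at hbm
          exact hm ((hbm ▸ hc) ▸ ha)
        · simp [hm, pv_lower_eq_empty_iff, hb]

-- ===== VERDICT (by name: the statement is the Claim_ definition above) =====
theorem is_valid_synonyms_py_spec : Claim_equal_is_valid_synonyms_py := by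
  intro value _
  unfold Spec_is_valid_synonyms_py is_valid_synonyms_py is_valid_synonyms_py_alt
  by_cases h : value = []
  · simp [h]
  · rw [if_neg h, if_neg h]
    exact pv_loop_eq value [] List.nodup_nil
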